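-- pv_equiv track=rewrite | github.com/jeffmcphail/mctheory-praxis | src/praxis/classification/__init__.py | sp_to_moody_equivalent
-- ===== SOURCE A (Python) =====
-- from dataclasses import dataclass
--
-- @dataclass
-- class CreditTier:
--     """Normalized credit rating tier."""
--     tier: str                 # INVESTMENT_GRADE, HIGH_YIELD, DISTRESSED, UNRATED
--     numeric_rank: int = 0     # 1 (AAA) to 22 (D)
--     is_investment_grade: bool = True
--
-- _SP_RATINGS: dict[str, CreditTier] = {
--     "AAA":  CreditTier("INVESTMENT_GRADE", 1, True),
--     "AA+":  CreditTier("INVESTMENT_GRADE", 2, True),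
--     "AA":   CreditTier("INVESTMENT_GRADE", 3, True),
--     "AA-":  CreditTier("INVESTMENT_GRADE", 4, True),
--     "A+":   CreditTier("INVESTMENT_GRADE", 5, True),
--     "A":    CreditTier("INVESTMENT_GRADE", 6, True),
--     "A-":   CreditTier("INVESTMENT_GRADE", 7, True),
--     "BBB+": CreditTier("INVESTMENT_GRADE", 8, True),
--     "BBB":  CreditTier("INVESTMENT_GRADE", 9, True),
--     "BBB-": CreditTier("INVESTMENT_GRADE", 10, True),
--     "BB+":  CreditTier("HIGH_YIELD", 11, False),
--     "BB":   CreditTier("HIGH_YIELD", 12, False),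
--     "BB-":  CreditTier("HIGH_YIELD", 13, False),
--     "B+":   CreditTier("HIGH_YIELD", 14, False),
--     "B":    CreditTier("HIGH_YIELD", 15, False),
--     "B-":   CreditTier("HIGH_YIELD", 16, False),
--     "CCC+": CreditTier("DISTRESSED", 17, False),
--     "CCC":  CreditTier("DISTRESSED", 18, False),
--     "CCC-": CreditTier("DISTRESSED", 19, False),
--     "CC":   CreditTier("DISTRESSED", 20, False),
--     "C":    CreditTier("DISTRESSED", 21, False),
--     "D":    CreditTier("DISTRESSED", 22, False),
-- }
--
-- def sp_rating_to_tier(rating: str) -> CreditTier | None: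
--     """Map S&P rating string to CreditTier."""
--     return _SP_RATINGS.get(rating.upper().strip())
--
-- _MOODY_RATINGS: dict[str, CreditTier] = {
--     "Aaa":  CreditTier("INVESTMENT_GRADE", 1, True),
--     "Aa1":  CreditTier("INVESTMENT_GRADE", 2, True),
--     "Aa2":  CreditTier("INVESTMENT_GRADE", 3, True),
--     "Aa3":  CreditTier("INVESTMENT_GRADE", 4, True),
--     "A1":   CreditTier("INVESTMENT_GRADE", 5, True),
--     "A2":   CreditTier("INVESTMENT_GRADE", 6, True),
--     "A3":   CreditTier("INVESTMENT_GRADE", 7, True),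
--     "Baa1": CreditTier("INVESTMENT_GRADE", 8, True),
--     "Baa2": CreditTier("INVESTMENT_GRADE", 9, True),
--     "Baa3": CreditTier("INVESTMENT_GRADE", 10, True),
--     "Ba1":  CreditTier("HIGH_YIELD", 11, False),
--     "Ba2":  CreditTier("HIGH_YIELD", 12, False),
--     "Ba3":  CreditTier("HIGH_YIELD", 13, False),
--     "B1":   CreditTier("HIGH_YIELD", 14, False),
--     "B2":   CreditTier("HIGH_YIELD", 15, False),
--     "B3":   CreditTier("HIGH_YIELD", 16, False),
--     "Caa1": CreditTier("DISTRESSED", 17, False),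
--     "Caa2": CreditTier("DISTRESSED", 18, False),
--     "Caa3": CreditTier("DISTRESSED", 19, False),
--     "Ca":   CreditTier("DISTRESSED", 20, False),
--     "C":    CreditTier("DISTRESSED", 21, False),
-- }
--
-- def sp_to_moody_equivalent(sp_rating: str) -> str | None:
--     """Map S&P rating to equivalent Moody's rating."""
--     sp_tier = sp_rating_to_tier(sp_rating)
--     if sp_tier is None:
--         return None
--     # Find Moody's with same numeric rank
--     for moody_str, moody_tier in _MOODY_RATINGS.items():
--         if moody_tier.numeric_rank == sp_tier.numeric_rank:
--             return moody_str
--     return None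
-- ===== SOURCE B (Python) =====
-- # B: one precomputed direct S&P->Moody table; a single dict lookup replaces
-- # the tier lookup plus linear scan of A.
-- _SP_TO_MOODY = {
--     "AAA": "Aaa", "AA+": "Aa1", "AA": "Aa2", "AA-": "Aa3",
--     "A+": "A1", "A": "A2", "A-": "A3",
--     "BBB+": "Baa1", "BBB": "Baa2", "BBB-": "Baa3",
--     "BB+": "Ba1", "BB": "Ba2", "BB-": "Ba3",
--     "B+": "B1", "B": "B2", "B-": "B3",
--     "CCC+": "Caa1", "CCC": "Caa2", "CCC-": "Caa3",
--     "CC": "Ca", "C": "C",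
-- }
--
-- def sp_to_moody_equivalent(sp_rating: str) -> str | None:
--     """Map S&P rating to equivalent Moody's rating."""
--     return _SP_TO_MOODY.get(sp_rating.upper().strip())
-- ===== Notes on version B (the rewrite author's own statement) =====
-- stated objective: simpler
-- what changed: A looks up the S&P tier and then linearly scans the Moody's table for a matching numeric rank; B precomputes one direct S&P-string-to-Moody's-string table so the function is a single dict lookup with no scan loop.
import Mathlib
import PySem

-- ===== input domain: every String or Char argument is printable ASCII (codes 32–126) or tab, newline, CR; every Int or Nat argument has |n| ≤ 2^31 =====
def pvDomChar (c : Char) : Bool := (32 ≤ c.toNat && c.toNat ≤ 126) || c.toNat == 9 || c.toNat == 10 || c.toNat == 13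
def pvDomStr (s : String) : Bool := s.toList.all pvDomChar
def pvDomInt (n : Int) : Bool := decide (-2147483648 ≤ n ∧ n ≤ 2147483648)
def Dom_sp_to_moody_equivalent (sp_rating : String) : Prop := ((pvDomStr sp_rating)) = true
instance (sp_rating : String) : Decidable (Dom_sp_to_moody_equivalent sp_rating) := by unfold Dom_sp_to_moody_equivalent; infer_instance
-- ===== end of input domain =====

-- B replaces A's tier lookup followed by a linear scan of the Moody table with a single
-- lookup in one precomputed direct S&P->Moody table (objective: simpler).

-- ===== PORT A =====
structure CreditTier where
  tier : String
  numeric_rank : Int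
  is_investment_grade : Bool
deriving DecidableEq, Repr

def spRatings : PySem.Dict String CreditTier := PySem.Dict.ofList [
  ("AAA",  ⟨"INVESTMENT_GRADE", 1, true⟩),
  ("AA+",  ⟨"INVESTMENT_GRADE", 2, true⟩),
  ("AA",   ⟨"INVESTMENT_GRADE", 3, true⟩),
  ("AA-",  ⟨"INVESTMENT_GRADE", 4, true⟩),
  ("A+",   ⟨"INVESTMENT_GRADE", 5, true⟩),
  ("A",    ⟨"INVESTMENT_GRADE", 6, true⟩),
  ("A-",   ⟨"INVESTMENT_GRADE", 7, true⟩),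
  ("BBB+", ⟨"INVESTMENT_GRADE", 8, true⟩),
  ("BBB",  ⟨"INVESTMENT_GRADE", 9, true⟩),
  ("BBB-", ⟨"INVESTMENT_GRADE", 10, true⟩),
  ("BB+",  ⟨"HIGH_YIELD", 11, false⟩),
  ("BB",   ⟨"HIGH_YIELD", 12, false⟩),
  ("BB-",  ⟨"HIGH_YIELD", 13, false⟩),
  ("B+",   ⟨"HIGH_YIELD", 14, false⟩),
  ("B",    ⟨"HIGH_YIELD", 15, false⟩),
  ("B-",   ⟨"HIGH_YIELD", 16, false⟩),
  ("CCC+", ⟨"DISTRESSED", 17, false⟩),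
  ("CCC",  ⟨"DISTRESSED", 18, false⟩),
  ("CCC-", ⟨"DISTRESSED", 19, false⟩),
  ("CC",   ⟨"DISTRESSED", 20, false⟩),
  ("C",    ⟨"DISTRESSED", 21, false⟩),
  ("D",    ⟨"DISTRESSED", 22, false⟩)]

def sp_rating_to_tier (rating : String) : Option CreditTier :=
  spRatings.get? (PySem.Str.strip (PySem.Str.upper rating))

def moodyRatings : PySem.Dict String CreditTier := PySem.Dict.ofList [
  ("Aaa",  ⟨"INVESTMENT_GRADE", 1, true⟩),
  ("Aa1",  ⟨"INVESTMENT_GRADE", 2, true⟩),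
  ("Aa2",  ⟨"INVESTMENT_GRADE", 3, true⟩),
  ("Aa3",  ⟨"INVESTMENT_GRADE", 4, true⟩),
  ("A1",   ⟨"INVESTMENT_GRADE", 5, true⟩),
  ("A2",   ⟨"INVESTMENT_GRADE", 6, true⟩),
  ("A3",   ⟨"INVESTMENT_GRADE", 7, true⟩),
  ("Baa1", ⟨"INVESTMENT_GRADE", 8, true⟩),
  ("Baa2", ⟨"INVESTMENT_GRADE", 9, true⟩),
  ("Baa3", ⟨"INVESTMENT_GRADE", 10, true⟩),
  ("Ba1",  ⟨"HIGH_YIELD", 11, false⟩),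
  ("Ba2",  ⟨"HIGH_YIELD", 12, false⟩),
  ("Ba3",  ⟨"HIGH_YIELD", 13, false⟩),
  ("B1",   ⟨"HIGH_YIELD", 14, false⟩),
  ("B2",   ⟨"HIGH_YIELD", 15, false⟩),
  ("B3",   ⟨"HIGH_YIELD", 16, false⟩),
  ("Caa1", ⟨"DISTRESSED", 17, false⟩),
  ("Caa2", ⟨"DISTRESSED", 18, false⟩),
  ("Caa3", ⟨"DISTRESSED", 19, false⟩),
  ("Ca",   ⟨"DISTRESSED", 20, false⟩),
  ("C",    ⟨"DISTRESSED", 21, false⟩)]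

def sp_to_moody_equivalent (sp_rating : String) : Option String :=
  match sp_rating_to_tier sp_rating with
  | none => none
  | some sp_tier =>
    -- for moody_str, moody_tier in _MOODY_RATINGS.items(): return first match
    match moodyRatings.items.find? (fun p => p.2.numeric_rank == sp_tier.numeric_rank) with
    | some p => some p.1
    | none => none

-- ===== PORT B =====
def spToMoodyTable : PySem.Dict String String := PySem.Dict.ofList [
  ("AAA", "Aaa"), ("AA+", "Aa1"), ("AA", "Aa2"), ("AA-", "Aa3"),
  ("A+", "A1"), ("A", "A2"), ("A-", "A3"),
  ("BBB+", "Baa1"), ("BBB", "Baa2"), ("BBB-", "Baa3"),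
  ("BB+", "Ba1"), ("BB", "Ba2"), ("BB-", "Ba3"),
  ("B+", "B1"), ("B", "B2"), ("B-", "B3"),
  ("CCC+", "Caa1"), ("CCC", "Caa2"), ("CCC-", "Caa3"),
  ("CC", "Ca"), ("C", "C")]

def sp_to_moody_equivalent_alt (sp_rating : String) : Option String :=
  spToMoodyTable.get? (PySem.Str.strip (PySem.Str.upper sp_rating))

-- ===== PRECONDITION & SPEC =====
def Spec_sp_to_moody_equivalent (sp_rating : String) (out : Option String) : Prop := out = sp_to_moody_equivalent_alt sp_rating
instance (sp_rating : String) (out : Option String) : Decidable (Spec_sp_to_moody_equivalent sp_rating out) := by unfold Spec_sp_to_moody_equivalent; infer_instance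

-- ===== CLAIM (what is proved, stated in full; the proofs are below) =====
def Claim_equal_sp_to_moody_equivalent : Prop := ∀ (sp_rating : String), Dom_sp_to_moody_equivalent sp_rating → Spec_sp_to_moody_equivalent sp_rating (sp_to_moody_equivalent sp_rating)

-- ===== LEMMAS AND PROOFS =====

-- Both programs are a function of the same normalized key; on every key the two
-- table computations agree.
theorem key_eq (k : String) :
    (match spRatings.get? k with
     | none => none
     | some sp_tier =>
       match moodyRatings.items.find? (fun p => p.2.numeric_rank == sp_tier.numeric_rank) with
       | some p => some p.1
       | none => none) = spToMoodyTable.get? k := by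
  by_cases h0 : k = "AAA"
  · subst h0; rfl
  ·
    by_cases h1 : k = "AA+"
    · subst h1; rfl
    ·
      by_cases h2 : k = "AA"
      · subst h2; rfl
      ·
        by_cases h3 : k = "AA-"
        · subst h3; rfl
        ·
          by_cases h4 : k = "A+"
          · subst h4; rfl
          ·
            by_cases h5 : k = "A"
            · subst h5; rfl
            ·
              by_cases h6 : k = "A-"
              · subst h6; rfl
              ·
                by_cases h7 : k = "BBB+"
                · subst h7; rfl
                ·
                  by_cases h8 : k = "BBB"
                  · subst h8; rfl
                  ·
                    by_cases h9 : k = "BBB-"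
                    · subst h9; rfl
                    ·
                      by_cases h10 : k = "BB+"
                      · subst h10; rfl
                      ·
                        by_cases h11 : k = "BB"
                        · subst h11; rfl
                        ·
                          by_cases h12 : k = "BB-"
                          · subst h12; rfl
                          ·
                            by_cases h13 : k = "B+"
                            · subst h13; rfl
                            ·
                              by_cases h14 : k = "B"
                              · subst h14; rfl
                              ·
                                by_cases h15 : k = "B-"
                                · subst h15; rfl
                                ·
                                  by_cases h16 : k = "CCC+"
                                  · subst h16; rfl
                                  ·
                                    by_cases h17 : k = "CCC"
                                    · subst h17; rfl
                                    ·
                                      by_cases h18 : k = "CCC-"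
                                      · subst h18; rfl
                                      ·
                                        by_cases h19 : k = "CC"
                                        · subst h19; rfl
                                        ·
                                          by_cases h20 : k = "C"
                                          · subst h20; rfl
                                          ·
                                            by_cases h21 : k = "D"
                                            · subst h21; rfl
                                            ·
                                              simp only [spRatings, moodyRatings, spToMoodyTable, PySem.Dict.ofList, PySem.Dict.update,
                                                List.foldl, PySem.Dict.get?_insert, PySem.Dict.get?_empty, h0, h1, h2, h3, h4, h5, h6, h7, h8, h9, h10, h11, h12, h13, h14, h15, h16, h17, h18, h19, h20, h21] <;> rfl

-- ===== VERDICT (by name: the statement is the Claim_ definition above) =====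
theorem sp_to_moody_equivalent_spec : Claim_equal_sp_to_moody_equivalent := by
  intro s _
  unfold Spec_sp_to_moody_equivalent sp_to_moody_equivalent sp_to_moody_equivalent_alt sp_rating_to_tier
  exact key_eq (PySem.Str.strip (PySem.Str.upper s))
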